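-- pv_equiv track=rewrite | github.com/juandavidjd/radar | completar_figuras.py | build_grid_from_design
-- ===== SOURCE A (Python) =====
-- def build_grid_from_design(rows_needed, digit_coords, decor_coords, placeholder="*"):
--     """Crea un bloque nuevo siguiendo el diseño, usando placeholder en dígitos."""
--     grid = [[""]*6 for _ in range(rows_needed)]
--     for (ri, ci) in decor_coords:
--         if 0 <= ri < rows_needed and 0 <= ci < 6:
--             grid[ri][ci] = "."  # decoración minimal
--     for (ri, ci) in digit_coords:
--         if 0 <= ri < rows_needed and 0 <= ci < 6:
--             grid[ri][ci] = placeholder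
--     return grid
-- ===== SOURCE B (Python) =====
-- def build_grid_from_design(rows_needed, digit_coords, decor_coords, placeholder="*"):
--     """Crea un bloque nuevo siguiendo el diseño, usando placeholder en dígitos."""
--     digit_set = set(digit_coords)
--     decor_set = set(decor_coords)
--     return [[placeholder if (r, c) in digit_set
--              else "." if (r, c) in decor_set
--              else ""
--              for c in range(6)]
--             for r in range(rows_needed)]
-- ===== Notes on version B (the rewrite author's own statement) =====
-- stated objective: idiomatic
-- what changed: Inverts the traversal: instead of two coord-writing passes that mutate a pre-built grid, B builds two membership sets once and produces the whole grid in a single cell-reading nested comprehension (digit checked before decor to keep digit priority); bounds filtering disappears because only valid cells are iterated.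
import Mathlib
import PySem

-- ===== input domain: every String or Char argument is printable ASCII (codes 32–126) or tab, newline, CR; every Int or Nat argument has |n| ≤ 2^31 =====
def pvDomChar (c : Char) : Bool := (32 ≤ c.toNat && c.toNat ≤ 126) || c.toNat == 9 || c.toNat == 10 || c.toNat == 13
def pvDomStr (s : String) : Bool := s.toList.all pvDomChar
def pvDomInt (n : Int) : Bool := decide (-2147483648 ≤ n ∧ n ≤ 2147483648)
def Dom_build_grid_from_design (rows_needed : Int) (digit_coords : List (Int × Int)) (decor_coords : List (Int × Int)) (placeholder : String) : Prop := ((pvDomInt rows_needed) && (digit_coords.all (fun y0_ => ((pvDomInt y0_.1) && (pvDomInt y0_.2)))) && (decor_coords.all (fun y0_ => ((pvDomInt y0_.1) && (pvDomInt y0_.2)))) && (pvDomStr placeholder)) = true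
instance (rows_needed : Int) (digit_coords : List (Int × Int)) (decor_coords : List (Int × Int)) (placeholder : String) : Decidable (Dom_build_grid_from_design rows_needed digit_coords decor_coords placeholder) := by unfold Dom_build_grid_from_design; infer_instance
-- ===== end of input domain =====

-- B inverts the traversal: membership tables + one cell-reading pass over the grid, instead of A's two coord-writing mutation passes (objective: idiomatic; same cost).

-- ===== PORT A =====
-- one loop body of A: guarded in-place write grid[ri][ci] = v
def pvStepA (rows_needed : Int) (v : String) (g : List (List String)) (p : Int × Int) : List (List String) :=
  if 0 ≤ p.1 ∧ p.1 < rows_needed ∧ 0 ≤ p.2 ∧ p.2 < 6 then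
    g.modify p.1.toNat (fun row => row.set p.2.toNat v)
  else g

def build_grid_from_design (rows_needed : Int) (digit_coords : List (Int × Int)) (decor_coords : List (Int × Int)) (placeholder : String) : List (List String) :=
  let grid := List.replicate rows_needed.toNat (List.replicate 6 "")
  let grid := decor_coords.foldl (pvStepA rows_needed ".") grid
  digit_coords.foldl (pvStepA rows_needed placeholder) grid

-- ===== PORT B =====
def build_grid_from_design_alt (rows_needed : Int) (digit_coords : List (Int × Int)) (decor_coords : List (Int × Int)) (placeholder : String) : List (List String) :=
  let digit_set := PySem.Set.ofList digit_coords
  let decor_set := PySem.Set.ofList decor_coords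
  (List.range rows_needed.toNat).map (fun (r : Nat) =>
    (List.range 6).map (fun (c : Nat) =>
      if ((r : Int), (c : Int)) ∈ digit_set then placeholder
      else if ((r : Int), (c : Int)) ∈ decor_set then "." else ""))

-- ===== PRECONDITION & SPEC =====
def Spec_build_grid_from_design (rows_needed : Int) (digit_coords : List (Int × Int)) (decor_coords : List (Int × Int)) (placeholder : String) (out : List (List String)) : Prop := out = build_grid_from_design_alt rows_needed digit_coords decor_coords placeholder
instance (rows_needed : Int) (digit_coords : List (Int × Int)) (decor_coords : List (Int × Int)) (placeholder : String) (out : List (List String)) : Decidable (Spec_build_grid_from_design rows_needed digit_coords decor_coords placeholder out) := by unfold Spec_build_grid_from_design; infer_instance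

-- ===== CLAIM (what is proved, stated in full; the proofs are below) =====
def Claim_equal_build_grid_from_design : Prop := ∀ (rows_needed : Int) (digit_coords : List (Int × Int)) (decor_coords : List (Int × Int)) (placeholder : String), Dom_build_grid_from_design rows_needed digit_coords decor_coords placeholder → Spec_build_grid_from_design rows_needed digit_coords decor_coords placeholder (build_grid_from_design rows_needed digit_coords decor_coords placeholder)

-- ===== LEMMAS AND PROOFS =====

lemma pvStepA_length (R : Int) (v : String) (g : List (List String)) (p : Int × Int) :
    (pvStepA R v g p).length = g.length := by
  unfold pvStepA; split <;> simp

lemma pvFoldl_length (R : Int) (v : String) (coords : List (Int × Int)) (g : List (List String)) :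
    (coords.foldl (pvStepA R v) g).length = g.length := by
  induction coords generalizing g with
  | nil => rfl
  | cons p rest ih => simp [List.foldl, ih, pvStepA_length]

lemma pvStepA_rowlen (R : Int) (v : String) (g : List (List String)) (p : Int × Int)
    (h : ∀ row ∈ g, row.length = 6) : ∀ row ∈ pvStepA R v g p, row.length = 6 := by
  unfold pvStepA; split
  · intro row hrow
    obtain ⟨j, hj, rfl⟩ := List.mem_iff_getElem.mp hrow
    rw [List.getElem_modify]
    split
    · rw [List.length_set]
      exact h _ (List.getElem_mem _)
    · exact h _ (List.getElem_mem _)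
  · exact h

lemma pvFoldl_rowlen (R : Int) (v : String) (coords : List (Int × Int)) (g : List (List String))
    (h : ∀ row ∈ g, row.length = 6) : ∀ row ∈ coords.foldl (pvStepA R v) g, row.length = 6 := by
  induction coords generalizing g with
  | nil => exact h
  | cons p rest ih => exact ih _ (pvStepA_rowlen R v g p h)

-- total cell accessor
def pvCell (g : List (List String)) (r c : Nat) : String := (g.getD r []).getD c ""

lemma pvCell_step (R : Int) (v : String) (g : List (List String)) (p : Int × Int)
    (hg : g.length = R.toNat) (hrow : ∀ row ∈ g, row.length = 6)
    (r c : Nat) (hr : r < R.toNat) (hc : c < 6) :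
    pvCell (pvStepA R v g p) r c =
      if p = ((r : Int), (c : Int)) then v else pvCell g r c := by
  unfold pvStepA pvCell
  by_cases hb : 0 ≤ p.1 ∧ p.1 < R ∧ 0 ≤ p.2 ∧ p.2 < 6
  · rw [if_pos hb]
    obtain ⟨h1, h2, h3, h4⟩ := hb
    have hrn : p.1.toNat < g.length := by omega
    by_cases hpr : p.1.toNat = r
    · have hrowget : g.getD r [] = g[r]'(by omega) := List.getD_eq_getElem g [] (by omega)
      have hmod : (g.modify p.1.toNat (fun row => row.set p.2.toNat v)).getD r [] =
          (g[r]'(by omega)).set p.2.toNat v := by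
        subst hpr
        rw [List.getD_eq_getElem _ [] (by simpa using hrn)]
        simp
      rw [hmod, hrowget]
      have hlen : (g[r]'(by omega)).length = 6 := hrow _ (List.getElem_mem _)
      by_cases hpc : p.2.toNat = c
      · have hpeq : p = ((r : Int), (c : Int)) := by
          obtain ⟨p1, p2⟩ := p; simp_all; omega
        rw [if_pos hpeq]
        subst hpc
        rw [List.getD_eq_getElem _ "" (by simpa [hlen] using (by omega : p.2.toNat < 6))]
        simp
      · have hpne : ¬ p = ((r : Int), (c : Int)) := by
          obtain ⟨p1, p2⟩ := p; simp_all; omega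
        rw [if_neg hpne]
        rw [List.getD_eq_getElem _ "" (by simp [hlen]; omega),
            List.getD_eq_getElem _ "" (by omega)]
        simp [hpc]
    · have hpne : ¬ p = ((r : Int), (c : Int)) := by
        obtain ⟨p1, p2⟩ := p; simp_all; omega
      rw [if_neg hpne]
      have : (g.modify p.1.toNat (fun row => row.set p.2.toNat v)).getD r [] = g.getD r [] := by
        rw [List.getD_eq_getElem _ [] (by simpa using (by omega : r < g.length)),
            List.getD_eq_getElem _ [] (by omega)]
        simp [hpr]
      rw [this]
  · rw [if_neg hb]
    have hpne : ¬ p = ((r : Int), (c : Int)) := by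
      obtain ⟨p1, p2⟩ := p; simp_all; omega
    rw [if_neg hpne]

lemma pvCell_foldl (R : Int) (v : String) (coords : List (Int × Int)) (g : List (List String))
    (hg : g.length = R.toNat) (hrow : ∀ row ∈ g, row.length = 6)
    (r c : Nat) (hr : r < R.toNat) (hc : c < 6) :
    pvCell (coords.foldl (pvStepA R v) g) r c =
      if ((r : Int), (c : Int)) ∈ coords then v else pvCell g r c := by
  induction coords generalizing g with
  | nil => simp
  | cons p rest ih =>
    have hg' : (pvStepA R v g p).length = R.toNat := by rw [pvStepA_length]; exact hg
    have hrow' := pvStepA_rowlen R v g p hrow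
    rw [List.foldl_cons, ih _ hg' hrow', pvCell_step R v g p hg hrow r c hr hc]
    by_cases hmem : ((r : Int), (c : Int)) ∈ rest
    · simp [hmem]
    · by_cases hp : p = ((r : Int), (c : Int))
      · simp [hp, hmem]
      · have : ((r : Int), (c : Int)) ≠ p := fun h => hp h.symm
        simp [hmem, hp, this]

lemma pvCell_base (R : Int) (r c : Nat) (hr : r < R.toNat) (hc : c < 6) :
    pvCell (List.replicate R.toNat (List.replicate 6 "")) r c = "" := by
  unfold pvCell
  rw [List.getD_eq_getElem _ [] (by simpa using hr)]
  rw [List.getElem_replicate]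
  rw [List.getD_eq_getElem _ "" (by simpa using hc)]
  interval_cases c <;> rfl

theorem build_grid_from_design_spec_aux (rows_needed : Int)
    (digit_coords decor_coords : List (Int × Int)) (placeholder : String) :
    build_grid_from_design rows_needed digit_coords decor_coords placeholder =
      build_grid_from_design_alt rows_needed digit_coords decor_coords placeholder := by
  unfold build_grid_from_design build_grid_from_design_alt
  set g0 := List.replicate rows_needed.toNat (List.replicate 6 "") with hg0
  have hg0len : g0.length = rows_needed.toNat := by simp [hg0]
  have hg0row : ∀ row ∈ g0, row.length = 6 := by
    intro row hrow; rcases List.eq_of_mem_replicate hrow with rfl; simp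
  set A := digit_coords.foldl (pvStepA rows_needed placeholder)
    (decor_coords.foldl (pvStepA rows_needed ".") g0) with hA
  have hlen1 : (decor_coords.foldl (pvStepA rows_needed ".") g0).length = rows_needed.toNat := by
    rw [pvFoldl_length]; exact hg0len
  have hrow1 := pvFoldl_rowlen rows_needed "." decor_coords g0 hg0row
  have hAlen : A.length = rows_needed.toNat := by rw [hA, pvFoldl_length]; exact hlen1
  have hArow := pvFoldl_rowlen rows_needed placeholder digit_coords _ hrow1
  have hcell : ∀ r c : Nat, r < rows_needed.toNat → c < 6 →
      pvCell A r c =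
        if ((r : Int), (c : Int)) ∈ digit_coords then placeholder
        else if ((r : Int), (c : Int)) ∈ decor_coords then "." else "" := by
    intro r c hr hc
    rw [hA, pvCell_foldl _ _ _ _ hlen1 hrow1 r c hr hc,
        pvCell_foldl _ _ _ _ hg0len hg0row r c hr hc, pvCell_base _ _ _ hr hc]
  apply List.ext_getElem
  · simp [hAlen]
  · intro r h1 h2
    have hr : r < rows_needed.toNat := by simpa [hAlen] using h1
    have hrowmem : A[r]'h1 ∈ A := List.getElem_mem _
    have hrlen : (A[r]'h1).length = 6 := hArow _ hrowmem
    simp only [List.getElem_map, List.getElem_range]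
    apply List.ext_getElem
    · simp [hrlen]
    · intro c hc1 hc2
      have hc : c < 6 := by simpa [hrlen] using hc1
      have := hcell r c hr hc
      unfold pvCell at this
      rw [List.getD_eq_getElem _ [] h1, List.getD_eq_getElem _ "" hc1] at this
      simp only [List.getElem_map, List.getElem_range]
      rw [this]
      simp [PySem.Set.mem_ofList]

-- ===== VERDICT (by name: the statement is the Claim_ definition above) =====
theorem build_grid_from_design_spec : Claim_equal_build_grid_from_design := by
  intro rows_needed digit_coords decor_coords placeholder _
  exact build_grid_from_design_spec_aux rows_needed digit_coords decor_coords placeholder
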